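-- pv_equiv track=rewrite | github.com/perintyler/pychessengine | scripts/bitboard_generator.py | createBitboard
-- ===== SOURCE A (Python) =====
-- def createBitboard(moves):
-- 	board = ['0' for _ in range(64)]
-- 	for m in moves:
-- 		x,y = m
-- 		i = 8*y + x
-- 		board[i] = '1'
-- 	boardStr = ''.join(board)
-- 	return int(boardStr,2)
-- ===== SOURCE B (Python) =====
-- def createBitboard(moves):
-- 	result = 0
-- 	for x, y in moves:
-- 		result |= 1 << (63 - (8*y + x))
-- 	return result
-- ===== Notes on version B (the rewrite author's own statement) =====
-- stated objective: simpler
-- what changed: B replaces A's 64-cell character array with per-move list assignment, join and int(_,2) parsing by a single integer accumulator built with result |= 1 << (63 - (8*y + x)).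
-- outside the precondition, e.g. on createBitboard([(-1, 0)]): A returns 1, B returns 18446744073709551616
import Mathlib
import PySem

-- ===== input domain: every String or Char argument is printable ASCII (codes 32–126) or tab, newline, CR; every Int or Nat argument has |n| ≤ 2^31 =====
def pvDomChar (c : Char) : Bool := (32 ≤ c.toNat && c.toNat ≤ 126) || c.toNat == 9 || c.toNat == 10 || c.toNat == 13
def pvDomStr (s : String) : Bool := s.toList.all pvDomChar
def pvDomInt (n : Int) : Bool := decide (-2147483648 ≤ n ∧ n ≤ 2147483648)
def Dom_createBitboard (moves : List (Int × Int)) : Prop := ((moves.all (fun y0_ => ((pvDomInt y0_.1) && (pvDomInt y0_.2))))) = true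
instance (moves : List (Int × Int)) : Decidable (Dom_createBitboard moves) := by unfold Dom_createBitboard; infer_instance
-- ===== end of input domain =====

-- B drops A's 64-cell character array / join / int(_,2) pipeline and maintains the bitboard
-- directly as an integer built with `|=` and shifts (objective: simpler).

-- ===== PORT A =====
-- Python list assignment board[i] = c: negative i counts from the end; out-of-range i is an
-- IndexError (excluded by Pre_; modelled here as a no-op, never reached inside Pre_).
def pvSetItem (b : List Char) (i : Int) (c : Char) : List Char :=
  if 0 ≤ i ∧ i < b.length then b.set i.toNat c
  else if -(b.length : Int) ≤ i ∧ i < 0 then b.set (i + b.length).toNat c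
  else b

-- hand port of int(s, 2); exact on strings of '0'/'1' digits, which is all it receives here
def pvIntBase2 (s : String) : Int :=
  s.toList.foldl (fun a c => a * 2 + (if c = '1' then 1 else 0)) 0

def createBitboard (moves : List (Int × Int)) : Int :=
  pvIntBase2 (String.ofList
    (moves.foldl (fun b m => pvSetItem b (8 * m.2 + m.1) '1')
      ((List.range 64).map (fun _ => '0'))))

-- ===== PORT B =====
def createBitboard_alt (moves : List (Int × Int)) : Int :=
  moves.foldl (fun r m => Int.lor r ((1 : Int) <<< (63 - (8 * m.2 + m.1)))) 0

-- ===== PRECONDITION & SPEC =====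
-- Pre_ admits exactly the valid board coordinates, 0 ≤ 8*y + x < 64.  Indices ≥ 64 or < -64
-- make A raise IndexError; Pre_ also excludes move lists with a NEGATIVE square index
-- -64 ≤ 8*y+x < 0, off-board coordinates that are invalid input: there A still returns a
-- value, but it is an accident of Python's negative-index wraparound (it silently marks
-- square 64 + (8*y+x)), and B's oversized shift there is no valid 64-bit bitboard either,
-- so neither value is the specifiable one.
def Pre_createBitboard (moves : List (Int × Int)) : Prop :=
  ∀ m ∈ moves, 0 ≤ 8 * m.2 + m.1 ∧ 8 * m.2 + m.1 < 64
instance (moves : List (Int × Int)) : Decidable (Pre_createBitboard moves) := by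
  unfold Pre_createBitboard; infer_instance
def pvWitness_createBitboard : (List (Int × Int)) := [(0, 0), (7, 7), (3, 2)]

def Spec_createBitboard (moves : List (Int × Int)) (out : Int) : Prop :=
  out = createBitboard_alt moves
instance (moves : List (Int × Int)) (out : Int) : Decidable (Spec_createBitboard moves out) := by
  unfold Spec_createBitboard; infer_instance

-- ===== CLAIM (what is proved, stated in full; the proofs are below) =====
def Claim_equal_createBitboard : Prop := ∀ (moves : List (Int × Int)), Dom_createBitboard moves → Pre_createBitboard moves → Spec_createBitboard moves (createBitboard moves)

-- ===== LEMMAS AND PROOFS =====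

-- the 64-char board holding the binary digits of a (MSB first)
def boardOf (a : Nat) : List Char :=
  (List.range 64).map (fun j => if a.testBit (63 - j) then '1' else '0')

theorem boardOf_length (a : Nat) : (boardOf a).length = 64 := by
  simp [boardOf]

theorem boardOf_zero : (List.range 64).map (fun _ => '0') = boardOf 0 := by
  simp [boardOf]

theorem set_boardOf (a : Nat) (i : Nat) (hi : i < 64) :
    (boardOf a).set i '1' = boardOf (a ||| 2 ^ (63 - i)) := by
  apply List.ext_getElem
  · simp [boardOf]
  · intro j h1 h2
    simp only [boardOf, List.length_map, List.length_range] at h1 h2 ⊢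
    simp only [List.getElem_set, List.getElem_map, List.getElem_range,
      Nat.testBit_or, Nat.testBit_two_pow]
    by_cases hij : i = j
    · subst hij
      simp
    · have : ¬ (63 - i = 63 - j) := by omega
      simp [hij, this]

-- MSB-first parse of the lower n bits of a, as the port's foldl computes it
theorem val_bits (n : Nat) : ∀ (a : Nat), a < 2 ^ n →
    (List.range n).foldl (fun acc j => acc * 2 + (if a.testBit (n - 1 - j) then 1 else 0)) 0
      = a := by
  induction n with
  | zero => intro a ha; interval_cases a; simp
  | succ n ih =>
    intro a ha
    have hrange : List.range (n + 1) = List.range n ++ [n] := List.range_succ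
    rw [hrange, List.foldl_append]
    have hcongr :
        (List.range n).foldl (fun acc j => acc * 2 + (if a.testBit (n + 1 - 1 - j) then 1 else 0)) 0
          = (List.range n).foldl (fun acc j => acc * 2 + (if (a / 2).testBit (n - 1 - j) then 1 else 0)) 0 := by
      apply PySem.List.foldl_congr_mem'
      intro j hj acc
      have hjn : j < n := List.mem_range.mp hj
      have : a.testBit (n + 1 - 1 - j) = (a / 2).testBit (n - 1 - j) := by
        rw [Nat.testBit_div_two]
        congr 1
        omega
      rw [this]
    rw [hcongr, ih (a / 2) (by omega)]
    simp only [List.foldl_cons, List.foldl_nil, Nat.add_sub_cancel, Nat.sub_self]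
    rw [Nat.testBit_zero]
    by_cases h2 : a % 2 = 1
    · simp [h2]; omega
    · simp [h2]; omega

theorem val_boardOf (a : Nat) (ha : a < 2 ^ 64) :
    pvIntBase2 (String.ofList (boardOf a)) = (a : Int) := by
  unfold pvIntBase2 boardOf
  rw [String.toList_ofList, List.foldl_map]
  have hclean : (List.range 64).foldl
      (fun (acc : Int) j => acc * 2 + (if (if a.testBit (63 - j) then '1' else '0') = '1' then 1 else 0)) 0
      = (List.range 64).foldl (fun (acc : Int) j => acc * 2 + (if a.testBit (63 - j) then 1 else 0)) 0 := by
    apply PySem.List.foldl_congr_mem'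
    intro j _ acc
    by_cases h : a.testBit (63 - j) <;> simp [h]
  -- bridge the Int-valued foldl to the Nat-valued one
  have bridge : ∀ (l : List Nat) (s : Nat),
      l.foldl (fun (acc : Int) j => acc * 2 + (if a.testBit (63 - j) then 1 else 0)) (s : Int)
        = ((l.foldl (fun acc j => acc * 2 + (if a.testBit (63 - j) then 1 else 0)) s : Nat) : Int) := by
    intro l
    induction l with
    | nil => intro s; simp
    | cons x xs ihx =>
      intro s
      simp only [List.foldl_cons]
      by_cases h : a.testBit (63 - x)
      · simp only [h, if_true]
        rw [show ((s : Int) * 2 + 1) = (((s * 2 + 1 : Nat)) : Int) by push_cast; ring]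
        exact ihx (s * 2 + 1)
      · simp only [h, Bool.false_eq_true, if_false, add_zero]
        rw [show ((s : Int) * 2) = (((s * 2 : Nat)) : Int) by push_cast; ring]
        exact ihx (s * 2)
  have hb := bridge (List.range 64) 0
  simp only [Nat.cast_zero] at hb
  rw [hclean, hb]
  have hv := val_bits 64 a ha
  have hv' : (List.range 64).foldl (fun acc j => acc * 2 + (if a.testBit (63 - j) then 1 else 0)) 0 = a := by
    have : ∀ j, (64 - 1 - j) = 63 - j := by omega
    simpa [this] using hv
  rw [hv']

-- A's loop on a boardOf-shaped state mirrors a Nat-level OR fold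
theorem loop_eq (ms : List (Int × Int))
    (h : ∀ m ∈ ms, 0 ≤ 8 * m.2 + m.1 ∧ 8 * m.2 + m.1 < 64) :
    ∀ (a : Nat),
      ms.foldl (fun b m => pvSetItem b (8 * m.2 + m.1) '1') (boardOf a)
        = boardOf (ms.foldl (fun x m => x ||| 2 ^ (63 - (8 * m.2 + m.1).toNat)) a) := by
  induction ms with
  | nil => intro a; simp
  | cons m ms ihm =>
    intro a
    have hm := h m (List.mem_cons_self ..)
    have hrest : ∀ m' ∈ ms, 0 ≤ 8 * m'.2 + m'.1 ∧ 8 * m'.2 + m'.1 < 64 := by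
      intro m' hm'; exact h m' (List.mem_cons_of_mem _ hm')
    simp only [List.foldl_cons]
    have hstep : pvSetItem (boardOf a) (8 * m.2 + m.1) '1'
        = boardOf (a ||| 2 ^ (63 - (8 * m.2 + m.1).toNat)) := by
      unfold pvSetItem
      rw [boardOf_length]
      rw [if_pos (by push_cast; omega)]
      exact set_boardOf a _ (by omega)
    rw [hstep, ihm hrest]

theorem natfold_lt (ms : List (Int × Int)) :
    ∀ (a : Nat), a < 2 ^ 64 →
      ms.foldl (fun x m => x ||| 2 ^ (63 - (8 * m.2 + m.1).toNat)) a < 2 ^ 64 := by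
  induction ms with
  | nil => intro a ha; simpa using ha
  | cons m ms ihm =>
    intro a ha
    simp only [List.foldl_cons]
    apply ihm
    exact Nat.or_lt_two_pow ha (Nat.pow_lt_pow_right (by norm_num) (by omega))

-- B's Int fold equals the same Nat-level OR fold when every index is in [0, 64)
theorem alt_fold_eq (ms : List (Int × Int))
    (h : ∀ m ∈ ms, 0 ≤ 8 * m.2 + m.1 ∧ 8 * m.2 + m.1 < 64) :
    ∀ (a : Nat),
      ms.foldl (fun r m => Int.lor r ((1 : Int) <<< (63 - (8 * m.2 + m.1)))) (a : Int)
        = ((ms.foldl (fun x m => x ||| 2 ^ (63 - (8 * m.2 + m.1).toNat)) a : Nat) : Int) := by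
  induction ms with
  | nil => intro a; simp
  | cons m ms ihm =>
    intro a
    have hm := h m (List.mem_cons_self ..)
    have hrest : ∀ m' ∈ ms, 0 ≤ 8 * m'.2 + m'.1 ∧ 8 * m'.2 + m'.1 < 64 := by
      intro m' hm'; exact h m' (List.mem_cons_of_mem _ hm')
    simp only [List.foldl_cons]
    have hk : (63 - (8 * m.2 + m.1)) = (((63 - (8 * m.2 + m.1).toNat : Nat)) : Int) := by omega
    have hsh : ((1 : Int) <<< (63 - (8 * m.2 + m.1))) = ((2 ^ (63 - (8 * m.2 + m.1).toNat) : Nat) : Int) := by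
      conv_lhs => rw [hk]
      exact Int.one_shiftLeft _
    have hor : Int.lor (a : Int) ((2 ^ (63 - (8 * m.2 + m.1).toNat) : Nat) : Int)
        = ((a ||| 2 ^ (63 - (8 * m.2 + m.1).toNat) : Nat) : Int) := rfl
    rw [hsh, hor, ihm hrest]

-- ===== VERDICT (by name: the statement is the Claim_ definition above) =====
theorem createBitboard_spec : Claim_equal_createBitboard := by
  intro moves _ hpre
  unfold Spec_createBitboard createBitboard createBitboard_alt
  rw [boardOf_zero, loop_eq moves hpre 0,
    val_boardOf _ (natfold_lt moves 0 (by norm_num))]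
  have hb := alt_fold_eq moves hpre 0
  simp only [Nat.cast_zero] at hb
  rw [hb]
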